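-- pv_equiv track=rewrite | github.com/XploitGh0st/AEGIS-prismatic26 | backend/app/services/pcap_service.py | _extract_callback_url
-- ===== SOURCE A (Python) =====
-- def _extract_callback_url(jndi_string: str) -> str:
--     """Extract the callback URL from a JNDI string."""
--     # Try to find ldap://, rmi://, dns:// patterns
--     for proto in ["ldap://", "rmi://", "ldaps://", "dns://", "iiop://"]:
--         idx = jndi_string.lower().find(proto)
--         if idx >= 0:
--             url = jndi_string[idx:]
--             # Trim at closing brace or whitespace
--             for end_ch in ["}", " ", "\r", "\n", "\t", ","]:
--                 end_idx = url.find(end_ch)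
--                 if end_idx > 0:
--                     url = url[:end_idx]
--             return url
--     return "(embedded)"
-- ===== SOURCE B (Python) =====
-- def _extract_callback_url(jndi_string: str) -> str:
--     """Extract the callback URL from a JNDI string."""
--     lowered = jndi_string.lower()
--     for proto in ["ldap://", "rmi://", "ldaps://", "dns://", "iiop://"]:
--         idx = lowered.find(proto)
--         if idx >= 0:
--             url = jndi_string[idx:]
--             # one left-to-right scan: cut at the first delimiter after position 0
--             for i in range(1, len(url)):
--                 if url[i] in "} \r\n\t,":
--                     return url[:i]
--             return url
--     return "(embedded)"
-- ===== Notes on version B (the rewrite author's own statement) =====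
-- stated objective: simpler
-- what changed: Replaces A's six sequential find-and-trim passes over the sliced url (one str.find plus a slice per delimiter) with a single left-to-right scan that cuts at the first delimiter character after position 0, and lowercases the input once instead of once per protocol prefix.
import Mathlib
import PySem

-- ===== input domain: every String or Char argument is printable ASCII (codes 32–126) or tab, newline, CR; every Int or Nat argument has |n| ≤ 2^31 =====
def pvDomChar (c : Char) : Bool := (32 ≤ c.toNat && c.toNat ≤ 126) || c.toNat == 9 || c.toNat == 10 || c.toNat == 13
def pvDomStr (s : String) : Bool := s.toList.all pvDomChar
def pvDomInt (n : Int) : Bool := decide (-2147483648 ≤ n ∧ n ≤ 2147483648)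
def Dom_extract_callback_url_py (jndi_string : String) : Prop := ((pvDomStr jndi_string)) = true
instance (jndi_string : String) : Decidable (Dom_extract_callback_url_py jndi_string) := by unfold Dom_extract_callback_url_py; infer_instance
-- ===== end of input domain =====

-- B replaces A's six sequential find-and-trim passes by a single left-to-right scan that cuts
-- at the first delimiter after position 0 (and lowercases the input once); objective: simpler.

-- ===== PORT A =====
-- the six delimiter strings A trims at, in A's order
def pvDelimStrs : List String := ["}", " ", "\r", "\n", "\t", ","]

-- inner loop of A: for end_ch in [...]: end_idx = url.find(end_ch); if end_idx > 0: url = url[:end_idx]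
def pvTrimA (url : String) : String :=
  pvDelimStrs.foldl
    (fun url end_ch =>
      let end_idx := PySem.Str.find url end_ch
      if end_idx > 0 then PySem.Str.slice url none (some end_idx) else url)
    url

-- outer loop of A over the protocol prefixes (A recomputes jndi_string.lower() each iteration)
def pvLoopA (jndi_string : String) : List String → String
  | [] => "(embedded)"
  | proto :: rest =>
    let idx := PySem.Str.find (PySem.Str.lower jndi_string) proto
    if idx ≥ 0 then pvTrimA (PySem.Str.slice jndi_string (some idx) none)
    else pvLoopA jndi_string rest

def extract_callback_url_py (jndi_string : String) : String :=
  pvLoopA jndi_string ["ldap://", "rmi://", "ldaps://", "dns://", "iiop://"]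

-- ===== PORT B =====
-- Python `c in "} \r\n\t,"` for a single character c is exactly membership in its characters
def pvIsDelim (c : Char) : Bool := List.contains ['}', ' ', '\r', '\n', '\t', ','] c

-- B's scan `for i in range(1, len(url)): if url[i] in delims: return url[:i]`,
-- expressed as the chars of url[1:] kept up to the first delimiter
def pvScanB : List Char → List Char
  | [] => []
  | c :: cs => if pvIsDelim c then [] else c :: pvScanB cs

def pvTrimB (url : String) : String :=
  match url.toList with
  | [] => url
  | c :: cs => String.ofList (c :: pvScanB cs)

-- outer loop of B: lowered is computed once and passed in
def pvLoopB (jndi_string lowered : String) : List String → String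
  | [] => "(embedded)"
  | proto :: rest =>
    let idx := PySem.Str.find lowered proto
    if idx ≥ 0 then pvTrimB (PySem.Str.slice jndi_string (some idx) none)
    else pvLoopB jndi_string lowered rest

def extract_callback_url_py_alt (jndi_string : String) : String :=
  pvLoopB jndi_string (PySem.Str.lower jndi_string)
    ["ldap://", "rmi://", "ldaps://", "dns://", "iiop://"]

-- ===== PRECONDITION & SPEC =====
def Spec_extract_callback_url_py (jndi_string : String) (out : String) : Prop := out = extract_callback_url_py_alt jndi_string
instance (jndi_string : String) (out : String) : Decidable (Spec_extract_callback_url_py jndi_string out) := by unfold Spec_extract_callback_url_py; infer_instance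

-- ===== CLAIM (what is proved, stated in full; the proofs are below) =====
def Claim_equal_extract_callback_url_py : Prop := ∀ (jndi_string : String), Dom_extract_callback_url_py jndi_string → Spec_extract_callback_url_py jndi_string (extract_callback_url_py jndi_string)

-- ===== LEMMAS AND PROOFS =====

-- takeWhile only depends on the predicate's values on the list
theorem pv_takeWhile_congr {a : Type} (p q : a → Bool) (l : List a)
    (h : ∀ x ∈ l, p x = q x) : l.takeWhile p = l.takeWhile q := by
  induction l with
  | nil => rfl
  | cons c t ih =>
    have hc := h c (by simp)
    by_cases hp : p c = true
    · simp [hp, hc ▸ hp, ih (fun x hx => h x (by simp [hx]))]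
    · simp only [Bool.not_eq_true] at hp
      simp [hp, hc ▸ hp]

-- every delimiter character is fixed by lowerChar
theorem pv_delim_fix (c : Char) (h : pvIsDelim c = true) : PySem.Chars.lowerChar c = c := by
  simp [pvIsDelim] at h
  rcases h with h | h | h | h | h | h <;> subst h <;> decide

-- take at the first occurrence index is takeWhile
theorem pv_take_eq_takeWhile (d : Char) :
    ∀ (cs : List Char) (j : Nat), cs[j]? = some d → (∀ i < j, cs[i]? ≠ some d) →
      cs.take j = cs.takeWhile (fun x => x ≠ d) := by
  intro cs
  induction cs with
  | nil => intro j h _; simp at h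
  | cons a t ih =>
    intro j h hmin
    cases j with
    | zero =>
      simp only [List.getElem?_cons_zero, Option.some.injEq] at h
      subst h
      simp
    | succ j =>
      have ha : a ≠ d := by
        intro had; exact (hmin 0 (Nat.succ_pos j)) (by simp [had])
      have ht := ih j (by simpa using h) (fun i hi => by
        have := hmin (i+1) (Nat.succ_lt_succ hi); simpa using this)
      simp [List.take_succ_cons, ha, ht]

-- one step of A's trimming loop, on the character level
theorem pv_stepA (d : Char) (url : String) (c : Char) (cs : List Char)
    (hu : url.toList = c :: cs) (hc : c ≠ d) :
    ((fun url (end_ch : String) =>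
        let end_idx := PySem.Str.find url end_ch
        if end_idx > 0 then PySem.Str.slice url none (some end_idx) else url)
      url (String.ofList [d])).toList = c :: cs.takeWhile (fun x => x ≠ d) := by
  simp only [PySem.Str.find_eq, String.toList_ofList, hu]
  rcases lt_trichotomy (PySem.Chars.find (c :: cs) [d]) 0 with hlt | heq | hgt
  · -- not found: find = -1, no trim, and d ∉ cs
    have hge := PySem.Chars.neg_one_le_find (s := c :: cs) (sub := [d])
    have hm1 : PySem.Chars.find (c :: cs) [d] = -1 := le_antisymm (by omega) hge
    have hnin : ¬ ([d] <:+: (c :: cs)) := (PySem.Chars.find_eq_neg_one_iff _ _).mp hm1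
    have hdn : d ∉ cs := fun hmem =>
      hnin ((List.singleton_infix_iff d _).mpr (List.mem_cons_of_mem _ hmem))
    have hsame : cs.takeWhile (fun x => decide (x ≠ d)) = cs :=
      List.takeWhile_eq_self_iff.mpr (fun x hx => by
        simp only [decide_eq_true_eq]; rintro rfl; exact hdn hx)
    simp only [hm1]
    norm_num
    rw [hu]
    congr 1
    conv_lhs => rw [← hsame]
    apply pv_takeWhile_congr
    intro a _
    simp [decide_not]
  · -- found at 0: head would be d, contradiction
    exfalso
    have := (PySem.Chars.find_spec (s := c :: cs) (sub := [d]) (by omega)).1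
    rw [heq] at this
    simp at this
    exact hc this.symm
  · -- found at k > 0: trim to take k
    have hk0 : (0 : Int) ≤ PySem.Chars.find (c :: cs) [d] := by omega
    obtain ⟨hpre, hmin⟩ := PySem.Chars.find_spec (s := c :: cs) (sub := [d]) hk0
    set k : Nat := (PySem.Chars.find (c :: cs) [d]).toNat with hk
    have hkpos : 0 < k := by omega
    obtain ⟨j, hj⟩ : ∃ j, k = j + 1 := ⟨k - 1, by omega⟩
    have hget : cs[j]? = some d := by
      have hp2 : [d] <+: (c :: cs).drop k := hpre
      rw [hj] at hp2
      simp only [List.drop_succ_cons] at hp2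
      rcases hp2 with ⟨t, ht⟩
      have hh : (cs.drop j).head? = some d := by rw [← ht]; rfl
      rw [List.head?_drop] at hh
      simpa using hh
    have hmin' : ∀ i < j, cs[i]? ≠ some d := by
      intro i hi hgi
      apply hmin (i + 1) (by omega)
      simp only [List.drop_succ_cons]
      rcases List.getElem?_eq_some_iff.mp hgi with ⟨hlen, hval⟩
      refine ⟨cs.drop (i+1), ?_⟩
      rw [List.singleton_append, ← hval]
      exact List.getElem_cons_drop hlen
    have htake := pv_take_eq_takeWhile d cs j hget hmin'
    rw [if_pos hgt]
    simp only [PySem.Str.toList_slice, PySem.Chars.slice_eq_listSlice, hu]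
    rw [PySem.List.slice_to _ hk0, ← hk, hj]
    simp [htake]

-- A's whole trimming fold, on the character level
theorem pv_trimA_fold (L : List Char) :
    ∀ (url : String) (c : Char) (cs : List Char), url.toList = c :: cs → c ∉ L →
    (List.foldl
      (fun url (end_ch : String) =>
        let end_idx := PySem.Str.find url end_ch
        if end_idx > 0 then PySem.Str.slice url none (some end_idx) else url)
      url (L.map (fun d => String.ofList [d]))).toList
      = c :: cs.takeWhile (fun x => !(L.contains x)) := by
  induction L with
  | nil =>
    intro url c cs hu _
    have hsame : cs.takeWhile (fun x => !(List.contains ([] : List Char) x)) = cs :=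
      List.takeWhile_eq_self_iff.mpr (fun x _ => by simp)
    simpa [hu] using hsame.symm
  | cons d L' ih =>
    intro url c cs hu hc
    have hcd : c ≠ d := fun h => hc (by simp [h])
    have hstep := pv_stepA d url c cs hu hcd
    simp only [List.map_cons, List.foldl_cons]
    have hres := ih _ c (cs.takeWhile (fun x => x ≠ d)) hstep (fun h => hc (by simp [h]))
    rw [hres, List.takeWhile_takeWhile]
    congr 1
    apply pv_takeWhile_congr
    intro a _
    by_cases had : a = d <;> simp [had]

-- B's scan is takeWhile
theorem pv_scanB_eq (cs : List Char) : pvScanB cs = cs.takeWhile (fun x => !pvIsDelim x) := by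
  induction cs with
  | nil => rfl
  | cons c t ih =>
    by_cases h : pvIsDelim c <;> simp [pvScanB, h, ih]

-- the two trimmers agree on every url whose first character is not a delimiter
theorem pv_trim_eq (url : String) (c : Char) (cs : List Char)
    (hu : url.toList = c :: cs) (hc : pvIsDelim c = false) : pvTrimA url = pvTrimB url := by
  apply String.toList_inj.mp
  have hA : pvTrimA url = List.foldl
      (fun url (end_ch : String) =>
        let end_idx := PySem.Str.find url end_ch
        if end_idx > 0 then PySem.Str.slice url none (some end_idx) else url)
      url ((['}', ' ', '\r', '\n', '\t', ','] : List Char).map (fun d => String.ofList [d])) := rfl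
  have hcL : c ∉ (['}', ' ', '\r', '\n', '\t', ','] : List Char) := by
    intro hmem
    have hct : pvIsDelim c = true := by simpa [pvIsDelim] using hmem
    rw [hct] at hc
    simp at hc
  rw [hA, pv_trimA_fold _ url c cs hu hcL]
  simp only [pvTrimB, hu, String.toList_ofList, pv_scanB_eq, pvIsDelim]

-- the two outer loops agree whenever every prefix starts with a non-delimiter character
theorem pv_loop_eq (s : String) :
    ∀ L : List String,
      (∀ p ∈ L, ∃ p0 t, p.toList = p0 :: t ∧ pvIsDelim p0 = false) →
      pvLoopA s L = pvLoopB s (PySem.Str.lower s) L := by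
  intro L
  induction L with
  | nil => intro _; rfl
  | cons p rest ih =>
    intro hL
    obtain ⟨p0, t, hp, hp0⟩ := hL p (by simp)
    simp only [pvLoopA, pvLoopB]
    by_cases h : PySem.Str.find (PySem.Str.lower s) p ≥ 0
    · rw [if_pos h, if_pos h]
      have hfind : (0 : Int) ≤ PySem.Chars.find (PySem.Chars.lower s.toList) p.toList := by
        simpa [PySem.Str.find_eq, PySem.Str.toList_lower] using h
      obtain ⟨hpre, _⟩ := PySem.Chars.find_spec hfind
      have hidx' : (PySem.Str.find (PySem.Str.lower s) p).toNat
          = (PySem.Chars.find (PySem.Chars.lower s.toList) p.toList).toNat := by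
        simp [PySem.Str.find_eq, PySem.Str.toList_lower]
      have hurl : (PySem.Str.slice s (some (PySem.Str.find (PySem.Str.lower s) p)) none).toList
          = s.toList.drop (PySem.Str.find (PySem.Str.lower s) p).toNat := by
        rw [PySem.Str.toList_slice, PySem.Chars.slice_eq_listSlice,
          PySem.List.slice_from _ h]
      have hpre' : (p0 :: t) <+:
          (s.toList.drop (PySem.Str.find (PySem.Str.lower s) p).toNat).map PySem.Chars.lowerChar := by
        have hlow : PySem.Chars.lower s.toList = s.toList.map PySem.Chars.lowerChar := rfl
        rw [hidx', ← hp]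
        rw [List.map_drop]
        rw [← hlow]
        exact hpre
      cases hd : s.toList.drop (PySem.Str.find (PySem.Str.lower s) p).toNat with
      | nil => rw [hd] at hpre'; simp at hpre'
      | cons c cs =>
        rw [hd] at hpre'
        simp only [List.map_cons] at hpre'
        have hcl : PySem.Chars.lowerChar c = p0 := (List.cons_prefix_cons.mp hpre').1.symm
        have hcd : pvIsDelim c = false := by
          by_cases hcdt : pvIsDelim c = true
          · exfalso
            have hfix := pv_delim_fix c hcdt
            rw [hfix] at hcl
            subst hcl
            rw [hcdt] at hp0
            simp at hp0
          · simpa using hcdt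
        exact pv_trim_eq _ c cs (by rw [hurl, hd]) hcd
    · rw [if_neg h, if_neg h]
      exact ih (fun q hq => hL q (by simp [hq]))

-- ===== VERDICT (by name: the statement is the Claim_ definition above) =====
theorem extract_callback_url_py_spec : Claim_equal_extract_callback_url_py := by
  intro s _
  unfold Spec_extract_callback_url_py extract_callback_url_py extract_callback_url_py_alt
  apply pv_loop_eq
  intro p hp
  simp only [List.mem_cons, List.not_mem_nil, or_false] at hp
  rcases hp with rfl | rfl | rfl | rfl | rfl
  · exact ⟨'l', "dap://".toList, by decide, by decide⟩
  · exact ⟨'r', "mi://".toList, by decide, by decide⟩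
  · exact ⟨'l', "daps://".toList, by decide, by decide⟩
  · exact ⟨'d', "ns://".toList, by decide, by decide⟩
  · exact ⟨'i', "iop://".toList, by decide, by decide⟩
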